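-- pv_equiv track=rewrite | github.com/BaguetteEater/picross_generator_3000 | picross_generator.py | count_blocks
-- ===== SOURCE A (Python) =====
-- from typing import Dict, Tuple, List, Union
--
-- def count_blocks(img:List[List]) -> Tuple[List, List] :
--
-- 	height = len(img)
-- 	width = len(img[0])
--
-- 	line_blocks = [[] for y in range(width)]
-- 	col_blocks = [[] for y in range(height)]
--
-- 	# The array indicate if I incremented the column previously, indicating when I quit/enter a block
-- 	am_i_counting_col = [False for y in range(height)]
--
-- 	for i in range(height) :
--
-- 		block_line_length = 0
-- 		for j in range(width) :
--
-- 			if img[i][j] == 0 : # If it's black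
-- 				block_line_length += 1
--
-- 				if not am_i_counting_col[j] : # If I am not already couting a block in the col
-- 					col_blocks[j].append(1) # We initialize the counter
-- 				else :
-- 					col_blocks[j][-1] += 1 # We increment the last counter
--
-- 				am_i_counting_col[j] = True
--
-- 			else : # If it's white
-- 				if block_line_length > 0 : # If I've been counting row blocks
-- 					line_blocks[i].append(block_line_length)
-- 					block_line_length = 0
--
-- 				if am_i_counting_col[j] : # If i've been counting a col block
-- 					am_i_counting_col[j] = False
--
-- 		if block_line_length > 0 : # If there is a block at the end of the line
-- 			line_blocks[i].append(block_line_length)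
-- 			block_line_length = 0
--
-- 	return (line_blocks, col_blocks)
-- ===== SOURCE B (Python) =====
-- def count_blocks(img):
--
-- 	height = len(img)
-- 	width = len(img[0])
--
-- 	# same (swapped-size) initializations as the original
-- 	line_blocks = [[] for y in range(width)]
-- 	col_blocks = [[] for y in range(height)]
--
-- 	for i in range(height):
-- 		run = 0
-- 		for j in range(width):
-- 			if img[i][j] == 0:
-- 				run += 1
-- 			elif run > 0:
-- 				line_blocks[i].append(run)
-- 				run = 0
-- 		if run > 0:
-- 			line_blocks[i].append(run)
--
-- 	for j in range(width):
-- 		run = 0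
-- 		for i in range(height):
-- 			if img[i][j] == 0:
-- 				run += 1
-- 			elif run > 0:
-- 				col_blocks[j].append(run)
-- 				run = 0
-- 		if run > 0:
-- 			col_blocks[j].append(run)
--
-- 	return (line_blocks, col_blocks)
-- ===== Notes on version B (the rewrite author's own statement) =====
-- stated objective: simpler
-- what changed: A counts row and column blocks in one interleaved pass carrying a per-column am_i_counting_col flag array across rows; B keeps A's initializations but makes two independent run-length scans (each row left-to-right, then each column top-down) with a single local run counter and no cross-row state.
import Mathlib
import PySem

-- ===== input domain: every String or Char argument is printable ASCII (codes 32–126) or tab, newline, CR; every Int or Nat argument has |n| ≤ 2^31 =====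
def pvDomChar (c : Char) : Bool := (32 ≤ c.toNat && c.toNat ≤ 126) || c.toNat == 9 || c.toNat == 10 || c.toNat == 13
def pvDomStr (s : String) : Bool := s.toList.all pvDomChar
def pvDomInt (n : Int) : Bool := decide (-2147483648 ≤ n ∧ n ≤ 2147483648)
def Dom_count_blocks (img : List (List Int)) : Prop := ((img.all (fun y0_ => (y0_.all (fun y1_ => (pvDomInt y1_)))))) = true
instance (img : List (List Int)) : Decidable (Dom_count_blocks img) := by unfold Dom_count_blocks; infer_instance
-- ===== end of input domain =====

-- B replaces A's single pass with interleaved cross-row column state (am_i_counting_col) by two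
-- independent run-length scans — rows left-to-right, then columns top-down — keeping A's original
-- (swapped-size) initializations; objective: simpler, no speed claim.

-- ===== PORT A =====
-- Python's img[i][j] for the Nat indices both loops use; on out-of-range indices Python raises
-- IndexError (those inputs are excluded by Pre_count_blocks), here a junk default (1 ≠ 0).
def cellAt (img : List (List Int)) (i j : Nat) : Int :=
  (img.getD i []).getD j 1

-- col_blocks[j][-1] += 1; Python raises on an empty list, which A never reaches
-- (am_i_counting_col[j] is only True when col_blocks[j] is nonempty).
def incLast : List Int → List Int
  | [] => []
  | [x] => [x + 1]
  | x :: xs => x :: incLast xs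

-- the body of A's inner `for j in range(width)` loop;
-- state = (line_blocks, col_blocks, am_i_counting_col, block_line_length)
def stepA (img : List (List Int)) (i : Nat)
    (st : List (List Int) × List (List Int) × List Bool × Int) (j : Nat) :
    List (List Int) × List (List Int) × List Bool × Int :=
  match st with
  | (lb, cb, am, bll) =>
    if cellAt img i j == 0 then
      ((lb, (if am.getD j false then cb.modify j incLast else cb.modify j (· ++ [1])),
        am.set j true, bll + 1))
    else
      (((if bll > 0 then lb.modify i (· ++ [bll]) else lb), cb, am.set j false, 0))

-- one iteration of A's outer `for i in range(height)` loop, including the end-of-line flush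
def rowA (img : List (List Int)) (w : Nat)
    (st : List (List Int) × List (List Int) × List Bool) (i : Nat) :
    List (List Int) × List (List Int) × List Bool :=
  match st with
  | (lb, cb, am) =>
    match (List.range w).foldl (stepA img i) (lb, cb, am, 0) with
    | (lb', cb', am', bll) =>
      ((if bll > 0 then lb'.modify i (· ++ [bll]) else lb'), cb', am')

def count_blocks (img : List (List Int)) : List (List Int) × List (List Int) :=
  -- width = len(img[0]); Python raises IndexError on empty img (excluded by Pre_count_blocks)
  match (List.range img.length).foldl (rowA img (img.getD 0 []).length)
      (List.replicate (img.getD 0 []).length ([] : List Int),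
       List.replicate img.length ([] : List Int),
       List.replicate img.length false) with
  | (lb, cb, _) => (lb, cb)

-- ===== PORT B =====
-- the run accumulator of B's scanning loops: state = (blocks so far, current run length)
def runStep (st : List Int × Int) (c : Int) : List Int × Int :=
  match st with
  | (acc, run) =>
    if c == 0 then (acc, run + 1)
    else if run > 0 then (acc ++ [run], 0) else (acc, 0)

-- one scan of B: group the consecutive zeros of a line of cells, flushing the trailing run
def runsOf (cells : List Int) : List Int :=
  match cells.foldl runStep ([], 0) with
  | (acc, run) => if run > 0 then acc ++ [run] else acc

def count_blocks_alt (img : List (List Int)) : List (List Int) × List (List Int) :=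
  ((List.range img.length).foldl
      (fun lb i => lb.modify i
        (· ++ runsOf ((List.range (img.getD 0 []).length).map (fun j => cellAt img i j))))
      (List.replicate (img.getD 0 []).length ([] : List Int)),
   (List.range (img.getD 0 []).length).foldl
      (fun cb j => cb.modify j
        (· ++ runsOf ((List.range img.length).map (fun i => cellAt img i j))))
      (List.replicate img.length ([] : List Int)))

-- ===== PRECONDITION & SPEC =====
-- Pre_count_blocks is exactly the set of inputs on which Python A returns normally; everywhere else
-- A raises IndexError: on empty img (img[0]), when width = len(img[0]) > height (am_i_counting_col,
-- sized height, is indexed by every column), when some row is shorter than width (img[i][j]), and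
-- when a row with index ≥ width has a zero among its first width cells (line_blocks, sized width,
-- is indexed by that row when its block is flushed).
def Pre_count_blocks (img : List (List Int)) : Prop :=
  img ≠ [] ∧
  (img.headD []).length ≤ img.length ∧
  (∀ row ∈ img, (img.headD []).length ≤ row.length) ∧
  (∀ i < img.length, (img.headD []).length ≤ i →
    ∀ j < (img.headD []).length, (img.getD i []).getD j 1 ≠ 0)
instance (img : List (List Int)) : Decidable (Pre_count_blocks img) := by
  unfold Pre_count_blocks; infer_instance

def pvWitness_count_blocks : List (List Int) := [[0, 1], [1, 0], [1, 1]]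

def Spec_count_blocks (img : List (List Int)) (out : List (List Int) × List (List Int)) : Prop := out = count_blocks_alt img
instance (img : List (List Int)) (out : List (List Int) × List (List Int)) : Decidable (Spec_count_blocks img out) := by unfold Spec_count_blocks; infer_instance

-- ===== CLAIM (what is proved, stated in full; the proofs are below) =====
def Claim_equal_count_blocks : Prop := ∀ (img : List (List Int)), Dom_count_blocks img → Pre_count_blocks img → Spec_count_blocks img (count_blocks img)

-- ===== LEMMAS AND PROOFS =====
-- The two Lean ports are total (out-of-range accesses read defaults), and their equality in fact
-- holds for every img; Pre_count_blocks marks where the Python original returns at all.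

-- proof-only split of stepA: the (line_blocks, block_line_length) component …
def stepRow (img : List (List Int)) (i : Nat) (p : List (List Int) × Int) (j : Nat) :
    List (List Int) × Int :=
  if cellAt img i j == 0 then (p.1, p.2 + 1)
  else ((if p.2 > 0 then p.1.modify i (· ++ [p.2]) else p.1), 0)

-- … and the (col_blocks, am_i_counting_col) component
def stepCol (img : List (List Int)) (i : Nat) (p : List (List Int) × List Bool) (j : Nat) :
    List (List Int) × List Bool :=
  if cellAt img i j == 0 then
    ((if p.2.getD j false then p.1.modify j incLast else p.1.modify j (· ++ [1])), p.2.set j true)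
  else (p.1, p.2.set j false)

-- per-column update performed by one row, as a function of the closed column state
def colUpd (v : List Int) (b : Bool) (c : Int) : List Int × Bool :=
  if c == 0 then ((if b then incLast v else v ++ [1]), true) else (v, false)

def closeRuns (s : List Int × Int) : List Int := if s.2 > 0 then s.1 ++ [s.2] else s.1

def colCells (img : List (List Int)) (k j : Nat) : List Int :=
  (List.range k).map (fun i => cellAt img i j)

lemma getD_lt {α : Type} (l : List α) (d : α) (j : Nat) (h : j < l.length) :
    l.getD j d = l[j] := by
  simp [List.getD_eq_getElem?_getD, List.getElem?_eq_getElem h]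

lemma getD_ge {α : Type} (l : List α) (d : α) (j : Nat) (h : l.length ≤ j) :
    l.getD j d = d := by
  simp [List.getD_eq_getElem?_getD, List.getElem?_eq_none h]

lemma getD_modify_self {α : Type} (l : List α) (n : Nat) (f : α → α) (d : α)
    (h : n < l.length) : (l.modify n f).getD n d = f (l.getD n d) := by
  rw [getD_lt _ _ _ (by simpa using h), List.getElem_modify, if_pos rfl, getD_lt _ _ _ h]

lemma getD_modify_ne {α : Type} (l : List α) (n j : Nat) (f : α → α) (d : α)
    (hne : n ≠ j) : (l.modify n f).getD j d = l.getD j d := by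
  by_cases hlt : j < l.length
  · rw [getD_lt _ _ _ (by simpa using hlt), List.getElem_modify, if_neg hne, getD_lt _ _ _ hlt]
  · rw [getD_ge _ _ _ (by simpa using not_lt.1 hlt), getD_ge _ _ _ (not_lt.1 hlt)]

lemma getD_set_self {α : Type} (l : List α) (n : Nat) (a d : α)
    (h : n < l.length) : (l.set n a).getD n d = a := by
  rw [getD_lt _ _ _ (by simpa using h), List.getElem_set, if_pos rfl]

lemma getD_set_ne {α : Type} (l : List α) (n j : Nat) (a d : α)
    (hne : n ≠ j) : (l.set n a).getD j d = l.getD j d := by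
  by_cases hlt : j < l.length
  · rw [getD_lt _ _ _ (by simpa using hlt), List.getElem_set, if_neg hne, getD_lt _ _ _ hlt]
  · rw [getD_ge _ _ _ (by simpa using not_lt.1 hlt), getD_ge _ _ _ (not_lt.1 hlt)]

lemma modify_append_modify (l : List (List Int)) (i : Nat) (a b : List Int) :
    (l.modify i (· ++ a)).modify i (· ++ b) = l.modify i (· ++ (a ++ b)) := by
  apply List.ext_getElem
  · simp
  · intro j h1 h2
    by_cases hij : i = j <;> simp [hij, List.append_assoc]

lemma modify_append_nil (l : List (List Int)) (i : Nat) :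
    l.modify i (· ++ ([] : List Int)) = l := by
  apply List.ext_getElem
  · simp
  · intro j h1 h2
    by_cases hij : i = j <;> simp [hij]

lemma runsOf_eq (cells : List Int) : runsOf cells = closeRuns (cells.foldl runStep ([], 0)) := by
  unfold runsOf closeRuns
  rcases cells.foldl runStep ([], 0) with ⟨a, r⟩
  rfl

lemma runStep_nonneg (cs : List Int) :
    ∀ (acc : List Int) (r : Int), 0 ≤ r → 0 ≤ (cs.foldl runStep (acc, r)).2 := by
  induction cs with
  | nil => intro acc r h; simpa using h
  | cons c cs ih =>
    intro acc r h
    simp only [List.foldl_cons, runStep]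
    split
    · exact ih _ _ (by omega)
    · split
      · exact ih _ _ (by omega)
      · exact ih _ _ (by omega)

lemma incLast_append (xs : List Int) (x : Int) : incLast (xs ++ [x]) = xs ++ [x + 1] := by
  induction xs with
  | nil => rfl
  | cons y ys ih =>
    cases ys with
    | nil => rfl
    | cons z zs => simpa [incLast] using ih

lemma colUpd_close (acc : List Int) (r : Int) (hr : 0 ≤ r) (c : Int) :
    colUpd (closeRuns (acc, r)) (decide (0 < r)) c
      = (closeRuns (runStep (acc, r) c), decide (0 < (runStep (acc, r) c).2)) := by
  unfold colUpd closeRuns runStep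
  by_cases hc : c = 0
  · by_cases h0 : 0 < r
    · simp [hc, h0, incLast_append, show (0:Int) < r + 1 by omega]
    · have hr0 : r = 0 := by omega
      simp [hc, hr0]
  · by_cases h0 : 0 < r <;> simp [hc, h0]

lemma foldl_pair {α β γ : Type} (F : α × β → γ → α × β) (f : α → γ → α) (g : β → γ → β)
    (hF : ∀ a b x, F (a, b) x = (f a x, g b x)) (l : List γ) (a : α) (b : β) :
    l.foldl F (a, b) = (l.foldl f a, l.foldl g b) := by
  induction l generalizing a b with
  | nil => rfl
  | cons x xs ih => simp only [List.foldl_cons, hF]; exact ih _ _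

lemma stepA_split (img : List (List Int)) (i : Nat) (js : List Nat) :
    ∀ (lb cb : List (List Int)) (am : List Bool) (bll : Int),
      js.foldl (stepA img i) (lb, cb, am, bll)
        = ((js.foldl (stepRow img i) (lb, bll)).1,
           (js.foldl (stepCol img i) (cb, am)).1,
           (js.foldl (stepCol img i) (cb, am)).2,
           (js.foldl (stepRow img i) (lb, bll)).2) := by
  induction js with
  | nil => intro lb cb am bll; rfl
  | cons j js ih =>
    intro lb cb am bll
    simp only [List.foldl_cons, stepA, stepRow, stepCol]
    by_cases hc : cellAt img i j == 0
    · simp only [hc, if_true]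
      exact ih _ _ _ _
    · simp only [hc, Bool.false_eq_true, if_false]
      exact ih _ _ _ _

lemma rowFold (img : List (List Int)) (i : Nat) (js : List Nat) :
    ∀ (lb : List (List Int)) (acc : List Int) (run : Int),
      js.foldl (stepRow img i) (lb.modify i (· ++ acc), run)
        = (lb.modify i (· ++ (js.foldl (fun s j => runStep s (cellAt img i j)) (acc, run)).1),
           (js.foldl (fun s j => runStep s (cellAt img i j)) (acc, run)).2) := by
  induction js with
  | nil => intro lb acc run; rfl
  | cons j js ih =>
    intro lb acc run
    simp only [List.foldl_cons, stepRow, runStep]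
    by_cases hc : cellAt img i j == 0
    · simp only [hc, if_true]
      exact ih lb acc (run + 1)
    · simp only [hc, Bool.false_eq_true, if_false]
      by_cases hr : run > 0
      · simp only [hr, if_true]
        rw [modify_append_modify]
        exact ih lb (acc ++ [run]) 0
      · simp only [hr, if_false]
        exact ih lb acc 0

lemma rowA_row (img : List (List Int)) (w i : Nat) (lb : List (List Int)) :
    (if ((List.range w).foldl (stepRow img i) (lb, 0)).2 > 0
      then ((List.range w).foldl (stepRow img i) (lb, 0)).1.modify i
             (· ++ [((List.range w).foldl (stepRow img i) (lb, 0)).2])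
      else ((List.range w).foldl (stepRow img i) (lb, 0)).1)
      = lb.modify i (· ++ runsOf ((List.range w).map (fun j => cellAt img i j))) := by
  have hfold := rowFold img i (List.range w) lb [] 0
  rw [modify_append_nil] at hfold
  rw [hfold]
  rw [runsOf_eq, List.foldl_map]
  by_cases hg : ((List.range w).foldl (fun s j => runStep s (cellAt img i j)) (([] : List Int), (0:Int))).2 > 0
  · simp only [hg, if_true, modify_append_modify, closeRuns]
  · simp only [hg, if_false, closeRuns]

lemma rowA_eq (img : List (List Int)) (w : Nat)
    (st : List (List Int) × List (List Int) × List Bool) (i : Nat) :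
    rowA img w st i
      = (st.1.modify i (· ++ runsOf ((List.range w).map (fun j => cellAt img i j))),
         (List.range w).foldl (stepCol img i) st.2) := by
  obtain ⟨lb, cb, am⟩ := st
  show rowA img w (lb, cb, am) i = _
  simp only [rowA, stepA_split]
  rw [rowA_row]

lemma innerCol (img : List (List Int)) (k h : Nat) (n : Nat) :
    ∀ (cb : List (List Int)) (am : List Bool), cb.length = h → am.length = h →
      ((List.range n).foldl (stepCol img k) (cb, am)).1.length = h ∧
      ((List.range n).foldl (stepCol img k) (cb, am)).2.length = h ∧
      ∀ j, j < h →
        ((List.range n).foldl (stepCol img k) (cb, am)).1.getD j []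
          = (if j < n then (colUpd (cb.getD j []) (am.getD j false) (cellAt img k j)).1
             else cb.getD j []) ∧
        ((List.range n).foldl (stepCol img k) (cb, am)).2.getD j false
          = (if j < n then (colUpd (cb.getD j []) (am.getD j false) (cellAt img k j)).2
             else am.getD j false) := by
  induction n with
  | zero =>
    intro cb am hcb ham
    refine ⟨hcb, ham, ?_⟩
    intro j hj
    simp
  | succ n ih =>
    intro cb am hcb ham
    obtain ⟨hl1, hl2, hpt⟩ := ih cb am hcb ham
    rw [List.range_succ, List.foldl_append, List.foldl_cons, List.foldl_nil]
    rcases hres : (List.range n).foldl (stepCol img k) (cb, am) with ⟨cb', am'⟩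
    rw [hres] at hl1 hl2 hpt
    replace hl1 : cb'.length = h := hl1
    replace hl2 : am'.length = h := hl2
    have hstep1 : (stepCol img k (cb', am') n).1.length = h := by
      unfold stepCol
      split
      · split <;> simp [hl1]
      · simpa using hl1
    have hstep2 : (stepCol img k (cb', am') n).2.length = h := by
      unfold stepCol
      split <;> simp [hl2]
    refine ⟨hstep1, hstep2, ?_⟩
    intro j hj
    obtain ⟨hp1, hp2⟩ := hpt j hj
    by_cases hjn : j = n
    · subst hjn
      rw [if_neg (lt_irrefl j)] at hp1 hp2
      have hcb' : j < cb'.length := by omega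
      have ham' : j < am'.length := by omega
      constructor
      · rw [if_pos (Nat.lt_succ_self j)]
        unfold stepCol colUpd
        by_cases hc : cellAt img k j == 0
        · simp only [hc, if_true]
          rw [hp2]
          by_cases hb : am.getD j false
          · simp only [hb, if_true, getD_modify_self _ _ _ _ hcb', hp1]
          · simp only [hb, Bool.false_eq_true, if_false, getD_modify_self _ _ _ _ hcb', hp1]
        · simp only [hc, Bool.false_eq_true, if_false, hp1]
      · rw [if_pos (Nat.lt_succ_self j)]
        unfold stepCol colUpd
        by_cases hc : cellAt img k j == 0
        · simp only [hc, if_true, getD_set_self _ _ _ _ ham']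
        · simp only [hc, Bool.false_eq_true, if_false, getD_set_self _ _ _ _ ham']
    · have hiff : (j < n + 1) ↔ (j < n) := by omega
      have hp1' : cb'.getD j []
          = (if j < n then (colUpd (cb.getD j []) (am.getD j false) (cellAt img k j)).1
             else cb.getD j []) := hp1
      have hp2' : am'.getD j false
          = (if j < n then (colUpd (cb.getD j []) (am.getD j false) (cellAt img k j)).2
             else am.getD j false) := hp2
      constructor
      · unfold stepCol
        split
        · split <;>
            rw [getD_modify_ne _ _ _ _ _ (fun e => hjn e.symm), hp1'] <;> simp only [hiff]
        · rw [hp1']; simp only [hiff]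
      · unfold stepCol
        split <;>
          rw [getD_set_ne _ _ _ _ _ (fun e => hjn e.symm), hp2'] <;> simp only [hiff]

lemma colCells_succ (img : List (List Int)) (k j : Nat) :
    colCells img (k + 1) j = colCells img k j ++ [cellAt img k j] := by
  simp [colCells, List.range_succ]

lemma colInv (img : List (List Int)) (w h : Nat) (k : Nat) :
    (((List.range k).foldl (fun p i => (List.range w).foldl (stepCol img i) p)
        (List.replicate h ([] : List Int), List.replicate h false))).1.length = h ∧
    (((List.range k).foldl (fun p i => (List.range w).foldl (stepCol img i) p)
        (List.replicate h ([] : List Int), List.replicate h false))).2.length = h ∧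
    ∀ j, j < h →
      (((List.range k).foldl (fun p i => (List.range w).foldl (stepCol img i) p)
          (List.replicate h ([] : List Int), List.replicate h false))).1.getD j []
        = (if j < w then runsOf (colCells img k j) else []) ∧
      (((List.range k).foldl (fun p i => (List.range w).foldl (stepCol img i) p)
          (List.replicate h ([] : List Int), List.replicate h false))).2.getD j false
        = (if j < w then decide (0 < ((colCells img k j).foldl runStep ([], 0)).2) else false) := by
  induction k with
  | zero =>
    refine ⟨by simp, by simp, ?_⟩
    intro j hj
    constructor
    · rw [List.range_zero, List.foldl_nil, getD_lt _ _ _ (by simpa using hj),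
        List.getElem_replicate]
      simp [colCells, runsOf]
    · rw [List.range_zero, List.foldl_nil, getD_lt _ _ _ (by simpa using hj),
        List.getElem_replicate]
      simp [colCells]
  | succ k ih =>
    obtain ⟨hl1, hl2, hpt⟩ := ih
    rw [List.range_succ, List.foldl_append, List.foldl_cons, List.foldl_nil]
    rcases hres : (List.range k).foldl (fun p i => (List.range w).foldl (stepCol img i) p)
        (List.replicate h ([] : List Int), List.replicate h false) with ⟨cb, am⟩
    rw [hres] at hl1 hl2 hpt
    obtain ⟨il1, il2, ipt⟩ := innerCol img k h w cb am hl1 hl2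
    refine ⟨il1, il2, ?_⟩
    intro j hj
    obtain ⟨ip1, ip2⟩ := ipt j hj
    obtain ⟨hp1, hp2⟩ := hpt j hj
    have hp1' : cb.getD j [] = (if j < w then runsOf (colCells img k j) else []) := hp1
    have hp2' : am.getD j false
        = (if j < w then decide (0 < ((colCells img k j).foldl runStep ([], 0)).2)
           else false) := hp2
    by_cases hjw : j < w
    · rw [if_pos hjw] at hp1' hp2'
      have hnn : 0 ≤ ((colCells img k j).foldl runStep ([], 0)).2 :=
        runStep_nonneg _ _ _ le_rfl
      have hcu := colUpd_close ((colCells img k j).foldl runStep ([], 0)).1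
        ((colCells img k j).foldl runStep ([], 0)).2 hnn (cellAt img k j)
      rw [show (((colCells img k j).foldl runStep ([], 0)).1,
            ((colCells img k j).foldl runStep ([], 0)).2)
          = (colCells img k j).foldl runStep ([], 0) from rfl] at hcu
      constructor
      · rw [ip1, if_pos hjw, if_pos hjw, hp1', hp2', runsOf_eq (colCells img k j),
          runsOf_eq (colCells img (k + 1) j), colCells_succ, List.foldl_append,
          List.foldl_cons, List.foldl_nil]
        exact congrArg Prod.fst hcu
      · rw [ip2, if_pos hjw, if_pos hjw, hp1', hp2', runsOf_eq (colCells img k j),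
          colCells_succ, List.foldl_append, List.foldl_cons, List.foldl_nil]
        exact congrArg Prod.snd hcu
    · constructor
      · rw [ip1, if_neg hjw, hp1', if_neg hjw, if_neg hjw]
      · rw [ip2, if_neg hjw, hp2', if_neg hjw, if_neg hjw]

lemma BcolChar (img : List (List Int)) (h : Nat) (n : Nat) :
    ((List.range n).foldl
        (fun cb j => cb.modify j (· ++ runsOf ((List.range h).map (fun i => cellAt img i j))))
        (List.replicate h ([] : List Int))).length = h ∧
    ∀ j, j < h →
      ((List.range n).foldl
          (fun cb j => cb.modify j (· ++ runsOf ((List.range h).map (fun i => cellAt img i j))))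
          (List.replicate h ([] : List Int))).getD j []
        = (if j < n then runsOf ((List.range h).map (fun i => cellAt img i j)) else []) := by
  induction n with
  | zero =>
    refine ⟨by simp, ?_⟩
    intro j hj
    rw [List.range_zero, List.foldl_nil, getD_lt _ _ _ (by simpa using hj),
      List.getElem_replicate]
    simp
  | succ n ih =>
    obtain ⟨hl, hpt⟩ := ih
    rw [List.range_succ, List.foldl_append, List.foldl_cons, List.foldl_nil]
    constructor
    · simpa using hl
    · intro j hj
      have hp := hpt j hj
      by_cases hjn : j = n
      · subst hjn
        rw [if_neg (lt_irrefl j)] at hp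
        rw [getD_modify_self _ _ _ _ (by omega), hp, if_pos (Nat.lt_succ_self j),
          List.nil_append]
      · have hiff : (j < n + 1) ↔ (j < n) := by omega
        rw [getD_modify_ne _ _ _ _ _ (fun e => hjn e.symm), hp, if_congr hiff rfl rfl]

lemma ports_eq (img : List (List Int)) : count_blocks img = count_blocks_alt img := by
  unfold count_blocks count_blocks_alt
  rw [foldl_pair (rowA img (img.getD 0 []).length)
      (fun lb i => lb.modify i
        (· ++ runsOf ((List.range (img.getD 0 []).length).map (fun j => cellAt img i j))))
      (fun p i => (List.range (img.getD 0 []).length).foldl (stepCol img i) p)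
      (fun a b x => rowA_eq img (img.getD 0 []).length (a, b) x)]
  rcases hC : (List.range img.length).foldl
      (fun p i => (List.range (img.getD 0 []).length).foldl (stepCol img i) p)
      (List.replicate img.length ([] : List Int), List.replicate img.length false)
    with ⟨cbF, amF⟩
  refine Prod.ext rfl ?_
  show cbF = _
  obtain ⟨hl1, _, hpt⟩ := colInv img (img.getD 0 []).length img.length img.length
  rw [hC] at hl1 hpt
  have hl1' : cbF.length = img.length := hl1
  obtain ⟨bl, bpt⟩ := BcolChar img img.length (img.getD 0 []).length
  apply List.ext_getElem
  · rw [hl1', bl]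
  · intro j h1 h2
    have hj : j < img.length := by omega
    have hA : cbF.getD j []
        = (if j < (img.getD 0 []).length then runsOf (colCells img img.length j) else []) :=
      (hpt j hj).1
    rw [← getD_lt _ ([] : List Int) _ h1, ← getD_lt _ ([] : List Int) _ h2,
      hA, bpt j hj]
    rfl

-- ===== VERDICT (by name: the statement is the Claim_ definition above) =====
theorem count_blocks_spec : Claim_equal_count_blocks := by
  intro img _ _
  unfold Spec_count_blocks
  exact ports_eq img
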